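-- pv_equiv track=rewrite | github.com/jengzang/dialects-backend | app/service/logging/utils/usage_paths.py | _normalize_with_templates
-- ===== SOURCE A (Python) =====
-- from typing import Iterable
--
-- def _sorted_templates(
--     templates: Iterable[tuple[str, str]],
-- ) -> list[tuple[str, str]]:
--     return sorted(templates, key=lambda item: len(item[0]), reverse=True)
--
-- def _normalize_with_templates(path: str, templates: Iterable[tuple[str, str]]) -> str:
--     for prefix, param_template in _sorted_templates(templates):
--         if not path.startswith(prefix):
--             continue
--
--         suffix = path[len(prefix):]
--         if not suffix:
--             return path
--
--         template_segments = param_template.split("/")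
--         suffix_segments = suffix.split("/")
--         if len(suffix_segments) < len(template_segments):
--             return path
--
--         rest_segments = suffix_segments[len(template_segments):]
--         if rest_segments:
--             return f"{prefix}{param_template}/{'/'.join(rest_segments)}"
--
--         return f"{prefix}{param_template}"
--
--     return path
-- ===== SOURCE B (Python) =====
-- from typing import Iterable
--
-- def _normalize_with_templates(path: str, templates: Iterable[tuple[str, str]]) -> str:
--     best = None
--     for prefix, param_template in templates:
--         if path.startswith(prefix) and (best is None or len(prefix) > len(best[0])):
--             best = (prefix, param_template)
--     if best is None:
--         return path
--     prefix, param_template = best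
--     suffix = path[len(prefix):]
--     if not suffix:
--         return path
--     template_segments = param_template.split("/")
--     suffix_segments = suffix.split("/")
--     if len(suffix_segments) < len(template_segments):
--         return path
--     rest_segments = suffix_segments[len(template_segments):]
--     if rest_segments:
--         return f"{prefix}{param_template}/{'/'.join(rest_segments)}"
--     return f"{prefix}{param_template}"
-- ===== Notes on version B (the rewrite author's own statement) =====
-- stated objective: simpler
-- what changed: B replaces A's sort-the-templates-by-descending-prefix-length-then-scan with a single pass that keeps the matching template of strictly greatest prefix length (strict '>' so the first maximal match in original order wins, exactly as the stable descending sort does), then applies the same segment logic once.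
import Mathlib
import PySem

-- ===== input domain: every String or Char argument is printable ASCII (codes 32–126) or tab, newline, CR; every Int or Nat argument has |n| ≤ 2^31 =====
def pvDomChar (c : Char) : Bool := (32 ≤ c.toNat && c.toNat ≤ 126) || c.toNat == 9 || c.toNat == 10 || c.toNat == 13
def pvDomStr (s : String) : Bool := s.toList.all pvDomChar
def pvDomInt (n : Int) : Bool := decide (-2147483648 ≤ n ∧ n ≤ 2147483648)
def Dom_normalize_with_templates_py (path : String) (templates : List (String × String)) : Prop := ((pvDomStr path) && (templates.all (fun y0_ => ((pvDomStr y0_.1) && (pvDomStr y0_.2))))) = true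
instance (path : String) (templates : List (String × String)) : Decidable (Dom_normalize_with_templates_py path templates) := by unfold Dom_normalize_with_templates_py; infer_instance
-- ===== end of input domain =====

-- B replaces A's sort-then-scan by a single pass that keeps the longest matching prefix (strict '>' so the first maximal match in original order wins, matching the stable descending sort): simpler, one pass, no sort.


-- shared segment logic: both Pythons contain this identical suffix/segment code verbatim
def pvApplyTemplate (path pre param : String) : String :=
  let suffix := PySem.Str.slice path (some (PySem.Str.len pre)) none
  if PySem.Str.len suffix = 0 then path
  else
    let tsegs := (PySem.Str.split? param "/").getD []   -- sep "/" ≠ "", split? is always some here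
    let ssegs := (PySem.Str.split? suffix "/").getD []
    if ssegs.length < tsegs.length then path
    else
      let rest := PySem.List.slice ssegs (some (tsegs.length : Int)) none
      if rest ≠ [] then PySem.Str.join "" [pre, param, "/", PySem.Str.join "/" rest]
      else PySem.Str.join "" [pre, param]

-- ===== PORT A =====
-- A: scan the templates sorted by descending prefix length (stable), first matching prefix wins
def pvLoopA (path : String) : List (String × String) → String
  | [] => path
  | (pre, param) :: rest =>
    if PySem.Str.startswith path pre then pvApplyTemplate path pre param
    else pvLoopA path rest

def normalize_with_templates_py (path : String) (templates : List (String × String)) : String :=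
  pvLoopA path (PySem.List.sorted templates (fun item => PySem.Str.len item.1) true)

-- ===== PORT B =====
-- B: one pass, keep the matching template with the strictly greatest prefix length
def pvBestStep (path : String) (best : Option (String × String)) (t : String × String) : Option (String × String) :=
  if PySem.Str.startswith path t.1 then
    match best with
    | none => some t
    | some b => if PySem.Str.len b.1 < PySem.Str.len t.1 then some t else some b
  else best

def normalize_with_templates_py_alt (path : String) (templates : List (String × String)) : String :=
  match templates.foldl (pvBestStep path) none with
  | none => path
  | some (pre, param) => pvApplyTemplate path pre param

-- ===== PRECONDITION & SPEC =====
def Spec_normalize_with_templates_py (path : String) (templates : List (String × String)) (out : String) : Prop := out = normalize_with_templates_py_alt path templates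
instance (path : String) (templates : List (String × String)) (out : String) : Decidable (Spec_normalize_with_templates_py path templates out) := by unfold Spec_normalize_with_templates_py; infer_instance

-- ===== CLAIM (what is proved, stated in full; the proofs are below) =====
def Claim_equal_normalize_with_templates_py : Prop := ∀ (path : String) (templates : List (String × String)), Dom_normalize_with_templates_py path templates → Spec_normalize_with_templates_py path templates (normalize_with_templates_py path templates)

-- ===== LEMMAS AND PROOFS =====

-- A's loop returns the template of the first match (if any), with the segment logic applied
theorem pvLoopA_eq_find (path : String) (l : List (String × String)) :
    pvLoopA path l =
      match l.find? (fun t => PySem.Str.startswith path t.1) with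
      | none => path
      | some t => pvApplyTemplate path t.1 t.2 := by
  induction l with
  | nil => rfl
  | cons x rest ih =>
    obtain ⟨pre, par⟩ := x
    by_cases h : PySem.Str.startswith path pre = true
    · have h' : PySem.Chars.startswith path.toList pre.toList = true := by simpa using h
      simp [pvLoopA, h']
    · have h' : PySem.Chars.startswith path.toList pre.toList = false := by simpa using h
      simp [pvLoopA, h', ih]

-- inserting x into a length-descending list commutes find?-first-match with B's best-step
theorem pvFind_insertBy (path : String) (x : String × String) (ys : List (String × String))
    (hp : ys.Pairwise (fun a b => PySem.Str.len b.1 ≤ PySem.Str.len a.1)) :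
    (PySem.List.insertBy (fun a b => decide (PySem.Str.len b.1 < PySem.Str.len a.1)) x ys).find?
        (fun t => PySem.Str.startswith path t.1)
      = pvBestStep path (ys.find? (fun t => PySem.Str.startswith path t.1)) x := by
  induction ys with
  | nil =>
    by_cases hx : PySem.Str.startswith path x.1 = true <;>
      simp [PySem.List.insertBy, pvBestStep]
  | cons y ys ih =>
    have hy_ge : ∀ z ∈ ys, PySem.Str.len z.1 ≤ PySem.Str.len y.1 := by
      intro z hz; exact (List.pairwise_cons.mp hp).1 z hz
    have hp' : ys.Pairwise (fun a b => PySem.Str.len b.1 ≤ PySem.Str.len a.1) :=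
      (List.pairwise_cons.mp hp).2
    by_cases hlt : PySem.Str.len y.1 < PySem.Str.len x.1
    · -- x goes in front of y :: ys
      have hlt' : y.1.length < x.1.length := by simpa using hlt
      have hfront : PySem.List.insertBy (fun a b => decide (PySem.Str.len b.1 < PySem.Str.len a.1)) x (y :: ys)
          = x :: y :: ys := by simp [PySem.List.insertBy, hlt']
      rw [hfront]
      by_cases hx : PySem.Str.startswith path x.1 = true
      · -- any previous best b is in y :: ys, hence len b.1 ≤ len y.1 < len x.1
        have hx' : PySem.Chars.startswith path.toList x.1.toList = true := by simpa using hx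
        by_cases hsw : PySem.Chars.startswith path.toList y.1.toList = true
        · simp [pvBestStep, hx', hsw, hlt']
        · have hsw' : PySem.Chars.startswith path.toList y.1.toList = false := by simpa using hsw
          rcases hf : List.find? (fun t => PySem.Chars.startswith path.toList t.1.toList) ys with _ | b
          · simp [pvBestStep, hx', hsw', hf]
          · have hb : b ∈ ys := List.mem_of_find?_eq_some hf
            have hblt : b.1.length < x.1.length := by
              have h2 : PySem.Str.len b.1 < PySem.Str.len x.1 := lt_of_le_of_lt (hy_ge b hb) hlt
              simpa using h2
            simp [pvBestStep, hx', hsw', hf, hblt]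
      · have hx' : PySem.Chars.startswith path.toList x.1.toList = false := by simpa using hx
        simp [List.find?_cons, pvBestStep, hx']
    · -- x goes after y
      have hnl : ¬ (y.1.length < x.1.length) := by simpa using hlt
      have hafter : PySem.List.insertBy (fun a b => decide (PySem.Str.len b.1 < PySem.Str.len a.1)) x (y :: ys)
          = y :: PySem.List.insertBy (fun a b => decide (PySem.Str.len b.1 < PySem.Str.len a.1)) x ys := by
        simp [PySem.List.insertBy, hnl]
      rw [hafter]
      by_cases hy : PySem.Str.startswith path y.1 = true
      · have hy' : PySem.Chars.startswith path.toList y.1.toList = true := by simpa using hy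
        by_cases hx : PySem.Str.startswith path x.1 = true
        · have hx' : PySem.Chars.startswith path.toList x.1.toList = true := by simpa using hx
          simp [hy', pvBestStep, hx', hnl]
        · have hx' : PySem.Chars.startswith path.toList x.1.toList = false := by simpa using hx
          simp [hy', pvBestStep, hx']
      · have hy' : PySem.Chars.startswith path.toList y.1.toList = false := by simpa using hy
        have hih := ih hp'
        simp [pvBestStep] at hih
        simp [hy', pvBestStep, hih]

-- first match of the stable descending sort = B's one-pass maximum
theorem pvSorted_find_eq_fold (path : String) (templates : List (String × String)) :
    (PySem.List.sorted templates (fun item => PySem.Str.len item.1) true).find?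
        (fun t => PySem.Str.startswith path t.1)
      = templates.foldl (pvBestStep path) none := by
  induction templates using List.reverseRecOn with
  | nil => rfl
  | append_singleton l x ih =>
    rw [PySem.List.sorted_rev_eq_foldl_insertBy, List.foldl_append, List.foldl_append]
    simp only [List.foldl_cons, List.foldl_nil]
    rw [← PySem.List.sorted_rev_eq_foldl_insertBy]
    rw [pvFind_insertBy path x _ (PySem.List.sorted_pairwise_rev l _), ih]

-- ===== VERDICT (by name: the statement is the Claim_ definition above) =====
theorem normalize_with_templates_py_spec : Claim_equal_normalize_with_templates_py := by
  intro path templates _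
  unfold Spec_normalize_with_templates_py normalize_with_templates_py normalize_with_templates_py_alt
  rw [pvLoopA_eq_find path (PySem.List.sorted templates (fun item => PySem.Str.len item.1) true),
      pvSorted_find_eq_fold path templates]
  rcases templates.foldl (pvBestStep path) none with _ | ⟨pre, par⟩ <;> rfl
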